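-- pv_equiv track=rewrite | github.com/Nikole647/boggle.py | ex12_utils.py | max_score_paths
-- ===== SOURCE A (Python) =====
-- def in_range(x, y):
--     """check if a given index is inside the board"""
--     if 0 <= x < 4 and 0 <= y < 4:
--         return True
--     else:
--         return False
--
-- def is_near(x, y):
--     """returns all the possible movements of a given placement"""
--     lst_possible_near_tuples = [(x - 1, y - 1), (x - 1, y), (x - 1, y + 1),
--                                 (x, y + 1), (x + 1, y + 1), (x + 1, y),
--                                 (x, y - 1), (x + 1, y - 1)]
--     lst_near_tuples = []
--     for tup in lst_possible_near_tuples: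
--         if in_range(tup[0], tup[1]):  # if the index is in range
--             lst_near_tuples.append(tup)  # add it to the final list
--     return lst_near_tuples
--
-- def indices_of_board(board):
--     """returns a list of all the indices on the board"""
--     indices = []
--     for i in range(len(board)):
--         for j in range(len(board[0])):
--             indices.append([(i, j)])
--     return indices
--
-- def find_length_n_words(n, board, words):
--     """main func for find_length_n_words
--         finds all the possible words with a certain length
--          on the board """
--     possible_paths = []
--     indices = indices_of_board(board)
--     lst_of_words = words_filter(words, n)
--     for indx in indices:
--         cur_word = board[indx[0][0]][indx[0][1]]  # a single letter that
--         # will become the current word we are searching for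
--         find_length_n_words_helper(lst_of_words, cur_word,
--                                    board, indx, possible_paths) # call the
--         # helper function
--     return possible_paths
--
-- def find_length_n_words_helper(lst_of_words, cur_word, board, path,
--                                possible_paths):
--     """helper function for find_length_n_words
--         works almost exactly the same as find_length_n_paths_helper"""
--     filtered_words = []
--     for word in lst_of_words:
--         if str(cur_word) in word:
--             filtered_words.append(word)
--     if len(filtered_words) == 0:
--         return []
--     if cur_word in filtered_words:
--         return possible_paths.append(path[:])
--     for idx in is_near(path[-1][0], path[-1][1]):
--         if len(path) <= 15:  # if the length of the
--             # word is longer than the board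
--             if idx not in path:
--                 find_length_n_words_helper(filtered_words,
--                                            cur_word + board[idx[0]][idx[1]],
--                                            board, path+[idx], possible_paths)
--     return possible_paths
--
-- def words_filter(words, n):
--     """helper func- words filter for find_length_n_words"""
--     new_words = []
--     for word in words:
--         if n == len(word):
--             new_words.append(word)
--     return new_words
--
-- def max_score_paths(board, words):
--     """return for each word the path that gives the maximum score """
--     path_list = []
--     for word in words:
--         n = len(word)
--         paths = find_length_n_words(n, board, [word])
--         if paths:  # if path exists
--             path_list.append(max(paths, key=lambda x: len(x)))
--     return path_list
-- ===== SOURCE B (Python) =====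
-- _OFFSETS = ((-1, -1), (-1, 0), (-1, 1), (0, 1), (1, 1), (1, 0), (0, -1), (1, -1))
--
--
-- def _neighbours(cell):
--     x, y = cell
--     return [(x + dx, y + dy) for dx, dy in _OFFSETS
--             if 0 <= x + dx < 4 and 0 <= y + dy < 4]
--
--
-- def _dfs(board, word, path, cur, best):
--     """Extend path/cur; keep the first longest path spelling word."""
--     if not word.startswith(cur):
--         return best
--     if cur == word:
--         if best is None or len(path) > len(best):
--             return path
--         return best
--     for nb in _neighbours(path[-1]):
--         if len(path) <= 15 and nb not in path:
--             best = _dfs(board, word, path + [nb],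
--                         cur + board[nb[0]][nb[1]], best)
--     return best
--
--
-- def max_score_paths(board, words):
--     """return for each word the path that gives the maximum score """
--     result = []
--     for word in words:
--         best = None
--         for i in range(len(board)):
--             for j in range(len(board[0])):
--                 best = _dfs(board, word, [(i, j)], board[i][j], best)
--         if best is not None:
--             result.append(best)
--     return result
-- ===== Notes on version B (the rewrite author's own statement) =====
-- stated objective: simpler
-- what changed: Instead of A's pipeline (enumerate all start indices, collect every path spelling the word via a substring-filtered recursive helper into a list, then take max-by-length), B runs one best-so-far DFS per word with prefix pruning, keeping the first longest spelling path directly and building no intermediate path lists.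
import Mathlib
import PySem

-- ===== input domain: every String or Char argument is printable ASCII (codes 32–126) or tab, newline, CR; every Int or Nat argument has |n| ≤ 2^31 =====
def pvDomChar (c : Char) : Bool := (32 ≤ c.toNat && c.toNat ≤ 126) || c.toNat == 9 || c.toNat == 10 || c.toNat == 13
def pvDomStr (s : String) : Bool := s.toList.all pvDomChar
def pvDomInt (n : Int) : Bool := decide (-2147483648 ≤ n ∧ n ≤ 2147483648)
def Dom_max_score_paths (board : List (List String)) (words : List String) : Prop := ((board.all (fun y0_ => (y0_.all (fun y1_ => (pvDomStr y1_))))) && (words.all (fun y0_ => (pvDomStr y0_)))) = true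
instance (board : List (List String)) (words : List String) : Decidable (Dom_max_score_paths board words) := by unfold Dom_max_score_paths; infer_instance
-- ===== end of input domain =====

-- B replaces A's collect-every-path-then-max machinery by one best-so-far DFS per word (prefix pruning,
-- running first-longest path): simpler, no intermediate path lists. Return-value equivalence only (no mutation in either).

-- ===== PORT A =====
-- strings are carried as List Char (PySem.Chars) so that the kernel can unfold them

def inRangeA (x y : Int) : Bool :=
  if (0 ≤ x ∧ x < 4) ∧ (0 ≤ y ∧ y < 4) then true else false

def isNearA (x y : Int) : List (Int × Int) :=
  [(x - 1, y - 1), (x - 1, y), (x - 1, y + 1), (x, y + 1), (x + 1, y + 1),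
   (x + 1, y), (x, y - 1), (x + 1, y - 1)].filter (fun t => inRangeA t.1 t.2)

-- board[x][y] as a char list (indices produced by the ports are always in range inside Pre_)
def cellA (board : List (List String)) (x y : Int) : List Char :=
  (PySem.List.pyGetD (PySem.List.pyGetD board x []) y "").toList

def indicesOfBoardA (board : List (List String)) : List (List (Int × Int)) :=
  (List.range board.length).flatMap
    (fun i => (List.range board.headI.length).map (fun j => [((i : Int), (j : Int))]))

def wordsFilterA (words : List (List Char)) (n : Int) : List (List Char) :=
  words.filter (fun w => n == (w.length : Int))

def helperA (board : List (List String)) (fuel : Nat) (lst : List (List Char))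
    (cur : List Char) (path : List (Int × Int)) (acc : List (List (Int × Int))) :
    List (List (Int × Int)) :=
  let filtered := lst.filter (fun w => PySem.Chars.isIn cur w)
  if filtered.isEmpty then acc
  else if filtered.contains cur then acc ++ [path]
  else
    match fuel with
    | 0 => acc   -- fuel only bounds the recursion depth; the `path.length ≤ 15` guard fires first
    | Nat.succ fuel' =>
      let last := PySem.List.pyGetD path (-1) ((0 : Int), (0 : Int))
      (isNearA last.1 last.2).foldl
        (fun a idx =>
          if path.length ≤ 15 then
            if path.contains idx then a
            else helperA board fuel' filtered (cur ++ cellA board idx.1 idx.2) (path ++ [idx]) a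
          else a) acc

def findLengthNWordsA (n : Int) (board : List (List String)) (words : List (List Char)) :
    List (List (Int × Int)) :=
  let indices := indicesOfBoardA board
  let lst := wordsFilterA words n
  indices.foldl
    (fun acc indx =>
      let f := PySem.List.pyGetD indx 0 ((0 : Int), (0 : Int))
      helperA board 16 lst (cellA board f.1 f.2) indx acc) []

def max_score_paths (board : List (List String)) (words : List String) : List (List (Int × Int)) :=
  words.foldl
    (fun path_list word =>
      let n : Int := word.toList.length
      let paths := findLengthNWordsA n board [word.toList]
      match PySem.List.max? paths (fun x => x.length) with
      | none => path_list
      | some p => path_list ++ [p])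
    []

-- ===== PORT B =====

def neighboursB (cell : Int × Int) : List (Int × Int) :=
  [((-1 : Int), (-1 : Int)), (-1, 0), (-1, 1), (0, 1), (1, 1), (1, 0), (0, -1), (1, -1)].filterMap
    (fun d =>
      let x := cell.1 + d.1
      let y := cell.2 + d.2
      if (0 ≤ x ∧ x < 4) ∧ (0 ≤ y ∧ y < 4) then some (x, y) else none)

def dfsB (board : List (List String)) (word : List Char) (fuel : Nat)
    (path : List (Int × Int)) (cur : List Char) (best : Option (List (Int × Int))) :
    Option (List (Int × Int)) :=
  if PySem.Chars.startswith word cur = false then best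
  else if cur = word then
    match best with
    | none => some path
    | some b => if b.length < path.length then some path else some b
  else
    match fuel with
    | 0 => best   -- fuel only bounds the recursion depth; the `path.length ≤ 15` guard fires first
    | Nat.succ fuel' =>
      (neighboursB (PySem.List.pyGetD path (-1) ((0 : Int), (0 : Int)))).foldl
        (fun best idx =>
          if path.length ≤ 15 ∧ path.contains idx = false then
            dfsB board word fuel' (path ++ [idx]) (cur ++ (PySem.List.pyGetD (PySem.List.pyGetD board idx.1 []) idx.2 "").toList) best
          else best) best

def max_score_paths_alt (board : List (List String)) (words : List String) :
    List (List (Int × Int)) :=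
  words.foldl
    (fun result word =>
      let best :=
        (List.range board.length).foldl
          (fun best i =>
            (List.range board.headI.length).foldl
              (fun best j => dfsB board word.toList 16 [((i : Int), (j : Int))] ((PySem.List.pyGetD (PySem.List.pyGetD board (i : Int) []) (j : Int) "").toList) best)
              best)
          none
      match best with
      | none => result
      | some p => result ++ [p])
    []

-- ===== PRECONDITION & SPEC =====
-- Pre_ excludes boards on which the search can index outside the actual board (boards smaller than the
-- 4x4 grid hard-coded in in_range, or ragged boards), where A raises IndexError; on the small subset of
-- such boards where the search happens to stay inside, A still returns and B returns the same value.
def Pre_max_score_paths (board : List (List String)) (words : List String) : Prop :=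
  words = [] ∨ board = [] ∨ board.headI = [] ∨
  (4 ≤ board.length ∧ ∀ row ∈ board, 4 ≤ row.length ∧ board.headI.length ≤ row.length) ∨
  ((∀ row ∈ board, board.headI.length ≤ row.length) ∧
   ∀ w ∈ words, ∀ row ∈ board, ∀ cell ∈ row.take board.headI.length,
     PySem.Str.isIn cell w = false ∨ cell = w)

instance (board : List (List String)) (words : List String) :
    Decidable (Pre_max_score_paths board words) := by unfold Pre_max_score_paths; infer_instance

def pvWitness_max_score_paths : List (List String) × List String :=
  ([["a", "b", "c", "d"], ["e", "f", "g", "h"], ["i", "j", "k", "l"], ["m", "n", "o", "p"]],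
   ["af", "fab", "abfe"])

def Spec_max_score_paths (board : List (List String)) (words : List String)
    (out : List (List (Int × Int))) : Prop := out = max_score_paths_alt board words

instance (board : List (List String)) (words : List String) (out : List (List (Int × Int))) :
    Decidable (Spec_max_score_paths board words out) := by unfold Spec_max_score_paths; infer_instance

-- ===== CLAIM (what is proved, stated in full; the proofs are below) =====
def Claim_equal_max_score_paths : Prop :=
  ∀ (board : List (List String)) (words : List String),
    Dom_max_score_paths board words → Pre_max_score_paths board words →
      Spec_max_score_paths board words (max_score_paths board words)

-- ===== LEMMAS AND PROOFS =====

-- Python's max(paths, key=len) keeps the FIRST longest path: exactly B's best-update step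
def stepLen (best : Option (List (Int × Int))) (p : List (Int × Int)) : Option (List (Int × Int)) :=
  match best with
  | none => some p
  | some b => if b.length < p.length then some p else some b

theorem filterMap_if {α β : Type} (p : β → Prop) [DecidablePred p] (f : α → β) :
    ∀ ds : List α,
      ds.filterMap (fun d => if p (f d) then some (f d) else none) =
        (ds.map f).filter (fun t => decide (p t)) := by
  intro ds
  induction ds with
  | nil => rfl
  | cons d ds ih => by_cases h : p (f d) <;> simp [h, ih]

theorem inRangeA_eq_decide (x y : Int) :
    inRangeA x y = decide ((0 ≤ x ∧ x < 4) ∧ (0 ≤ y ∧ y < 4)) := by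
  by_cases h : (0 ≤ x ∧ x < 4) ∧ (0 ≤ y ∧ y < 4) <;> simp [inRangeA, h]

theorem near_eq (c : Int × Int) : neighboursB c = isNearA c.1 c.2 := by
  have h := filterMap_if (fun t : Int × Int => (0 ≤ t.1 ∧ t.1 < 4) ∧ (0 ≤ t.2 ∧ t.2 < 4))
    (fun d : Int × Int => (c.1 + d.1, c.2 + d.2))
    [((-1 : Int), (-1 : Int)), (-1, 0), (-1, 1), (0, 1), (1, 1), (1, 0), (0, -1), (1, -1)]
  have hb : neighboursB c = _ := h
  rw [hb]
  simp [isNearA, inRangeA_eq_decide, sub_eq_add_neg]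

-- generic: a fold whose step is an append-homomorphism is an append-homomorphism
theorem foldl_hom_append {α β : Type} (g : List α → β → List α)
    (h : ∀ a x, g a x = a ++ g [] x) :
    ∀ (ns : List β) (a : List α), ns.foldl g a = a ++ ns.foldl g [] := by
  intro ns
  induction ns with
  | nil => simp
  | cons x ns ih =>
    intro a
    simp only [List.foldl_cons]
    rw [ih (g a x), h a x, ih (g [] x), List.append_assoc]

theorem max?_eq_foldl_stepLen (paths : List (List (Int × Int))) :
    PySem.List.max? paths (fun x => x.length) = paths.foldl stepLen none := by
  unfold PySem.List.max?
  congr 1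
  funext b p
  cases b <;> rfl

-- the helper only ever appends to possible_paths
theorem helperA_hom (board : List (List String)) :
    ∀ (fuel : Nat) (lst : List (List Char)) (cur : List Char) (path : List (Int × Int))
      (acc : List (List (Int × Int))),
      helperA board fuel lst cur path acc = acc ++ helperA board fuel lst cur path [] := by
  intro fuel
  induction fuel with
  | zero =>
    intro lst cur path acc
    simp only [helperA]
    split_ifs <;> simp
  | succ fuel ih =>
    intro lst cur path acc
    simp only [helperA]
    cases h1 : (List.filter (fun w => PySem.Chars.isIn cur w) lst).isEmpty with
    | true => simp
    | false =>
      simp only [Bool.false_eq_true, if_false]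
      cases h2 : (List.filter (fun w => PySem.Chars.isIn cur w) lst).contains cur with
      | true => simp
      | false =>
        simp only [Bool.false_eq_true, if_false]
        apply foldl_hom_append
        intro a idx
        by_cases hl : path.length ≤ 15
        · by_cases hm : idx ∈ path
          · simp [hl, hm]
          · have hc : path.contains idx = false := by simp [hm]
            simp only [if_pos hl, hc, Bool.false_eq_true, if_false]
            conv_lhs => rw [ih]
        · simp [hl]

-- if cur cannot be extended to the word, the subtree emits nothing
theorem helperA_prune (board : List (List String)) (word : List Char) :
    ∀ (fuel : Nat) (cur : List Char) (path : List (Int × Int)),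
      ¬ cur <+: word → helperA board fuel [word] cur path [] = [] := by
  intro fuel
  induction fuel with
  | zero =>
    intro cur path hnp
    have hne : cur ≠ word := fun h => hnp (h ▸ List.prefix_refl _)
    cases hin : PySem.Chars.isIn cur word
    · simp [helperA, hin]
    · simp [helperA, hin, hne]
  | succ fuel ih =>
    intro cur path hnp
    have hne : cur ≠ word := fun h => hnp (h ▸ List.prefix_refl _)
    cases hin : PySem.Chars.isIn cur word
    · simp [helperA, hin]
    · have hfilt : [word].filter (fun w => PySem.Chars.isIn cur w) = [word] := by simp [hin]
      simp only [helperA, hfilt]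
      simp only [List.isEmpty_cons, Bool.false_eq_true, if_false]
      have hcon : [word].contains cur = false := by simp [hne]
      simp only [hcon, Bool.false_eq_true, if_false]
      have hall : ∀ (ns : List (Int × Int)) (a : List (List (Int × Int))),
          ns.foldl
            (fun a idx =>
              if path.length ≤ 15 then
                if path.contains idx then a
                else helperA board fuel [word] (cur ++ cellA board idx.1 idx.2) (path ++ [idx]) a
              else a) a = a := by
        intro ns
        induction ns with
        | nil => intro a; rfl
        | cons idx ns ihns =>
          intro a
          rw [List.foldl_cons]
          have hg : (if path.length ≤ 15 then
                if path.contains idx then a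
                else helperA board fuel [word] (cur ++ cellA board idx.1 idx.2) (path ++ [idx]) a
              else a) = a := by
            by_cases hl : path.length ≤ 15
            · cases hc : path.contains idx
              · have hnp' : ¬ (cur ++ cellA board idx.1 idx.2) <+: word := by
                  rintro ⟨s, hs⟩
                  exact hnp ⟨cellA board idx.1 idx.2 ++ s, by rw [← List.append_assoc]; exact hs⟩
                simp only [if_pos hl, Bool.false_eq_true, if_false]
                rw [helperA_hom, ih _ _ hnp', List.append_nil]
              · simp [hl]
            · simp [hl]
          rw [hg]
          exact ihns a
      exact hall _ []

-- main per-node correspondence: B's best-carrying DFS folds A's emitted paths with stepLen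
theorem dfsB_eq_foldl (board : List (List String)) (word : List Char) :
    ∀ (fuel : Nat) (cur : List Char) (path : List (Int × Int))
      (best : Option (List (Int × Int))),
      dfsB board word fuel path cur best =
        (helperA board fuel [word] cur path []).foldl stepLen best := by
  intro fuel
  induction fuel with
  | zero =>
    intro cur path best
    cases hsw : PySem.Chars.startswith word cur
    · have hnp : ¬ cur <+: word := fun h => by
        rw [(PySem.Chars.startswith_iff word cur).mpr h] at hsw; cases hsw
      rw [helperA_prune board word _ _ _ hnp]
      simp [dfsB, hsw]
    · have hpre : cur <+: word := (PySem.Chars.startswith_iff word cur).mp hsw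
      have hin : PySem.Chars.isIn cur word = true :=
        (PySem.Chars.isIn_iff_infix cur word).mpr hpre.isInfix
      by_cases heq : cur = word
      · subst heq
        cases best <;> simp [dfsB, helperA, hsw, hin, stepLen]
      · have hcon : [word].contains cur = false := by simp [heq]
        simp [dfsB, helperA, hsw, hin, heq]
  | succ fuel ih =>
    intro cur path best
    cases hsw : PySem.Chars.startswith word cur
    · have hnp : ¬ cur <+: word := fun h => by
        rw [(PySem.Chars.startswith_iff word cur).mpr h] at hsw; cases hsw
      rw [helperA_prune board word _ _ _ hnp]
      simp [dfsB, hsw]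
    · have hpre : cur <+: word := (PySem.Chars.startswith_iff word cur).mp hsw
      have hin : PySem.Chars.isIn cur word = true :=
        (PySem.Chars.isIn_iff_infix cur word).mpr hpre.isInfix
      have hfilt : [word].filter (fun w => PySem.Chars.isIn cur w) = [word] := by simp [hin]
      by_cases heq : cur = word
      · subst heq
        cases best <;> simp [dfsB, helperA, hsw, hin, stepLen]
      · have hcon : [word].contains cur = false := by simp [heq]
        simp only [dfsB, helperA, hfilt, hsw, Bool.true_eq_false, if_false, heq, if_false,
          List.isEmpty_cons, Bool.false_eq_true, hcon]
        rw [near_eq]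
        have homA : ∀ (a : List (List (Int × Int))) (idx : Int × Int),
            (fun a idx =>
                if path.length ≤ 15 then
                  if path.contains idx then a
                  else helperA board fuel [word] (cur ++ cellA board idx.1 idx.2) (path ++ [idx]) a
                else a) a idx =
              a ++ (fun a idx =>
                if path.length ≤ 15 then
                  if path.contains idx then a
                  else helperA board fuel [word] (cur ++ cellA board idx.1 idx.2) (path ++ [idx]) a
                else a) [] idx := by
          intro a idx
          by_cases hl : path.length ≤ 15
          · by_cases hm : idx ∈ path
            · simp [hl, hm]
            · have hc : path.contains idx = false := by simp [hm]
              simp only [if_pos hl, hc, Bool.false_eq_true, if_false]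
              conv_lhs => rw [helperA_hom]
          · simp [hl]
        have key : ∀ (idx : Int × Int) (b : Option (List (Int × Int))),
            (if path.length ≤ 15 ∧ path.contains idx = false then
                dfsB board word fuel (path ++ [idx]) (cur ++ (PySem.List.pyGetD (PySem.List.pyGetD board idx.1 []) idx.2 "").toList) b
              else b) =
              ((if path.length ≤ 15 then
                  if path.contains idx then ([] : List (List (Int × Int)))
                  else helperA board fuel [word] (cur ++ cellA board idx.1 idx.2) (path ++ [idx]) []
                else [])).foldl stepLen b := by
          intro idx b
          by_cases hl : path.length ≤ 15
          · by_cases hm : idx ∈ path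
            · have h1 : ¬ (path.length ≤ 15 ∧ path.contains idx = false) := by simp [hm]
              simp [hm]
            · have hc : path.contains idx = false := by simp [hm]
              rw [if_pos ⟨hl, hc⟩, if_pos hl]
              simp only [hc, Bool.false_eq_true, if_false]
              exact ih (cur ++ (PySem.List.pyGetD (PySem.List.pyGetD board idx.1 []) idx.2 "").toList) (path ++ [idx]) b
          · have h1 : ¬ (path.length ≤ 15 ∧ path.contains idx = false) := by simp [hl]
            simp [hl]
        have hall : ∀ (ns : List (Int × Int)) (best : Option (List (Int × Int))),
            ns.foldl
              (fun best idx =>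
                if path.length ≤ 15 ∧ path.contains idx = false then
                  dfsB board word fuel (path ++ [idx]) (cur ++ (PySem.List.pyGetD (PySem.List.pyGetD board idx.1 []) idx.2 "").toList) best
                else best) best =
              (ns.foldl
                (fun a idx =>
                  if path.length ≤ 15 then
                    if path.contains idx then a
                    else helperA board fuel [word] (cur ++ cellA board idx.1 idx.2) (path ++ [idx]) a
                  else a) []).foldl stepLen best := by
          intro ns
          induction ns with
          | nil => intro best; rfl
          | cons idx ns ihns =>
            intro best
            simp only [List.foldl_cons]
            rw [foldl_hom_append _ homA ns, List.foldl_append, key, ihns]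
        exact hall _ best

theorem foldl_append_foldl_stepLen {γ : Type} (E : γ → List (List (Int × Int))) :
    ∀ (l : List γ) (a : List (List (Int × Int))) (b : Option (List (Int × Int))),
      (l.foldl (fun acc x => acc ++ E x) a).foldl stepLen b =
        l.foldl (fun b x => (E x).foldl stepLen b) (a.foldl stepLen b) := by
  intro l
  induction l with
  | nil => intro a b; rfl
  | cons x l ih => intro a b; simp only [List.foldl_cons]; rw [ih, List.foldl_append]

-- per word, A's max-of-all-paths equals B's nested best-so-far fold
theorem perWord (board : List (List String)) (word : String) :
    PySem.List.max? (findLengthNWordsA (word.toList.length : Int) board [word.toList])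
        (fun x => x.length) =
      (List.range board.length).foldl
        (fun best i =>
          (List.range board.headI.length).foldl
            (fun best j => dfsB board word.toList 16 [((i : Int), (j : Int))] ((PySem.List.pyGetD (PySem.List.pyGetD board (i : Int) []) (j : Int) "").toList) best)
            best)
        none := by
  have hlst : wordsFilterA [word.toList] ((word.toList.length : Nat) : Int) = [word.toList] := by
    simp [wordsFilterA]
  simp only [findLengthNWordsA, hlst]
  rw [max?_eq_foldl_stepLen]
  have hfun : (fun (acc : List (List (Int × Int))) (indx : List (Int × Int)) =>
        helperA board 16 [word.toList]
          (cellA board (PySem.List.pyGetD indx 0 ((0 : Int), (0 : Int))).1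
            (PySem.List.pyGetD indx 0 ((0 : Int), (0 : Int))).2) indx acc) =
      (fun acc indx => acc ++ helperA board 16 [word.toList]
          (cellA board (PySem.List.pyGetD indx 0 ((0 : Int), (0 : Int))).1
            (PySem.List.pyGetD indx 0 ((0 : Int), (0 : Int))).2) indx []) := by
    funext acc indx
    exact helperA_hom ..
  rw [hfun, foldl_append_foldl_stepLen]
  have hfun2 : (fun (b : Option (List (Int × Int))) (indx : List (Int × Int)) =>
        (helperA board 16 [word.toList]
          (cellA board (PySem.List.pyGetD indx 0 ((0 : Int), (0 : Int))).1
            (PySem.List.pyGetD indx 0 ((0 : Int), (0 : Int))).2) indx []).foldl stepLen b) =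
      (fun b indx => dfsB board word.toList 16 indx
          (cellA board (PySem.List.pyGetD indx 0 ((0 : Int), (0 : Int))).1
            (PySem.List.pyGetD indx 0 ((0 : Int), (0 : Int))).2) b) := by
    funext b indx
    exact (dfsB_eq_foldl board word.toList 16 _ indx b).symm
  rw [hfun2]
  simp only [indicesOfBoardA]
  rw [List.foldl_flatMap]
  simp only [List.foldl_map, PySem.List.pyGetD_zero_cons, List.foldl_nil, cellA]

-- ===== VERDICT (by name: the statement is the Claim_ definition above) =====
theorem max_score_paths_spec : Claim_equal_max_score_paths := by
  intro board words _ _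
  unfold Spec_max_score_paths max_score_paths max_score_paths_alt
  have main : ∀ (ws : List String) (acc : List (List (Int × Int))),
      ws.foldl
        (fun path_list word =>
          let n : Int := word.toList.length
          let paths := findLengthNWordsA n board [word.toList]
          match PySem.List.max? paths (fun x => x.length) with
          | none => path_list
          | some p => path_list ++ [p]) acc =
      ws.foldl
        (fun result word =>
          let best :=
            (List.range board.length).foldl
              (fun best i =>
                (List.range board.headI.length).foldl
                  (fun best j =>
                    dfsB board word.toList 16 [((i : Int), (j : Int))] ((PySem.List.pyGetD (PySem.List.pyGetD board (i : Int) []) (j : Int) "").toList) best)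
                  best)
              none
          match best with
          | none => result
          | some p => result ++ [p]) acc := by
    intro ws
    induction ws with
    | nil => intro acc; rfl
    | cons w ws ih =>
      intro acc
      simp only [List.foldl_cons]
      rw [perWord board w]
      exact ih _
  exact main words []
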